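-- pv_equiv track=rewrite | github.com/bethelmelesse/IR_low_resource_research | project.py | to_all_query_to_all_document_score
-- ===== SOURCE A (Python) =====
-- def to_query_to_document_score(query_tf, doc_tf):
--     single_score = 0
--
--     for term, frequency in query_tf.items():
--         if term in doc_tf:
--             single_score += doc_tf[term] * query_tf[term]
--     return single_score
--
-- def to_query_to_all_document_score(query_tf, doc_tf):
--     score = {}
--
--     for i in range(len(doc_tf)):
--         score[i] = to_query_to_document_score(query_tf, doc_tf[i])
--
--     return score
--
-- def sort_dic_by_value_tolist(dic_to_be_sorted):
--     return list(sorted(dic_to_be_sorted.items(), key=lambda item: item[1], reverse=True))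
--
-- def to_all_query_to_all_document_score(queries_tf, doc_tf, k):          # rename
--     total_score = {}
--
--     for key, query_tf in queries_tf.items():
--         dic_to_be_sorted = to_query_to_all_document_score(query_tf, doc_tf)
--         sorted_doc_scores = sort_dic_by_value_tolist(dic_to_be_sorted)
--         top_k_doc = sorted_doc_scores[:k]
--         total_score[key] = top_k_doc
--
--     return total_score
-- ===== SOURCE B (Python) =====
-- def to_all_query_to_all_document_score(queries_tf, doc_tf, k):
--     # Build an inverted index once: term -> [(doc index, tf), ...] in doc order,
--     # then score each query only against the docs its terms touch.
--     inverted = {}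
--     for i, doc in enumerate(doc_tf):
--         for term, tf in doc.items():
--             inverted.setdefault(term, []).append((i, tf))
--     n = len(doc_tf)
--     total_score = {}
--     for key, query_tf in queries_tf.items():
--         scores = [0] * n
--         for term, qf in query_tf.items():
--             for i, tf in inverted.get(term, ()):
--                 scores[i] += tf * qf
--         total_score[key] = sorted(enumerate(scores), key=lambda p: p[1], reverse=True)[:k]
--     return total_score
-- ===== Notes on version B (the rewrite author's own statement) =====
-- stated objective: faster
-- what changed: B precomputes an inverted index (term -> list of (doc index, tf)) once and scores each query by accumulating into a score array only over the postings of its terms, instead of A's per-query scan of every document testing every query term.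
import Mathlib
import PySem

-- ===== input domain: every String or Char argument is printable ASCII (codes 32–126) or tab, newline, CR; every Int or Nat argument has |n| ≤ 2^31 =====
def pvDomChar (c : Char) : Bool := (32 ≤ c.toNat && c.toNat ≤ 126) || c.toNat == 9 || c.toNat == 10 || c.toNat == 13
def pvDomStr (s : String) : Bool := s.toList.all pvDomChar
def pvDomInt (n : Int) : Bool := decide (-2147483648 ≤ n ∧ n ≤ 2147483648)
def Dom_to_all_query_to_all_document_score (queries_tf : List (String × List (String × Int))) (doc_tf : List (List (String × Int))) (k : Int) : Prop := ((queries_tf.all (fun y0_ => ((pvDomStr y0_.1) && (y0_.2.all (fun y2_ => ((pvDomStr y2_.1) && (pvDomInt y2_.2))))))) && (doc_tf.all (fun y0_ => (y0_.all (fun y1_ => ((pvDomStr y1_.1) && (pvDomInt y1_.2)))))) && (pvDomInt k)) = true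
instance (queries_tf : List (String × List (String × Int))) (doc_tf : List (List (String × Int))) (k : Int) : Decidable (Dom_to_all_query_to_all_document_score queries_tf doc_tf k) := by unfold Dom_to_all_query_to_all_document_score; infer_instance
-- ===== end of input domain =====

-- B replaces A's per-query full document scan by a precomputed inverted index and a per-query
-- score-accumulation array; the top-k selection (stable sort by score descending, slice) is unchanged.

-- ===== PORT A =====
-- dict arguments arrive as association lists; Python's dict construction is PySem.Dict.ofList.
def to_query_to_document_score (query_tf doc_tf : PySem.Dict String Int) : Int :=
  query_tf.items.foldl
    (fun s p => if doc_tf.contains p.1 then s + doc_tf.getD p.1 0 * query_tf.getD p.1 0 else s) 0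
  -- the two subscripts are guarded (term in doc_tf; term iterated from query_tf), so getD _ 0 is exact

def to_query_to_all_document_score (query_tf : PySem.Dict String Int)
    (doc_tf : List (PySem.Dict String Int)) : PySem.Dict Int Int :=
  (PySem.List.pyRange 0 (doc_tf.length : Int)).foldl
    (fun sc i => sc.insert i
      (to_query_to_document_score query_tf (PySem.List.pyGetD doc_tf i PySem.Dict.empty)))
    PySem.Dict.empty
  -- i ranges over 0..len-1, so the list subscript is in range and pyGetD's default is never taken

def sort_dic_by_value_tolist (d : PySem.Dict Int Int) : List (Int × Int) :=
  PySem.List.sorted d.items (fun p => p.2) true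

def to_all_query_to_all_document_score (queries_tf : List (String × List (String × Int))) (doc_tf : List (List (String × Int))) (k : Int) : List (String × List (Int × Int)) :=
  let qd := PySem.Dict.ofList queries_tf
  let docs := doc_tf.map (fun d => PySem.Dict.ofList d)
  (qd.items.foldl
    (fun (total : PySem.Dict String (List (Int × Int))) p =>
      total.insert p.1
        (PySem.List.slice
          (sort_dic_by_value_tolist (to_query_to_all_document_score (PySem.Dict.ofList p.2) docs))
          none (some k)))
    PySem.Dict.empty).items

-- ===== PORT B =====
def to_all_query_to_all_document_score_alt (queries_tf : List (String × List (String × Int))) (doc_tf : List (List (String × Int))) (k : Int) : List (String × List (Int × Int)) :=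
  let docs := doc_tf.map (fun d => PySem.Dict.ofList d)
  -- inverted index: term -> [(doc index, tf), ...]  (setdefault/append = modify _ [] (· ++ [·]))
  let inverted : PySem.Dict String (List (Int × Int)) :=
    (PySem.List.enumerate docs).foldl
      (fun inv p => p.2.items.foldl (fun inv t => inv.modify t.1 [] (· ++ [(p.1, t.2)])) inv)
      PySem.Dict.empty
  let n := docs.length
  let qd := PySem.Dict.ofList queries_tf
  (qd.items.foldl
    (fun (total : PySem.Dict String (List (Int × Int))) p =>
      let q := PySem.Dict.ofList p.2
      let scores := q.items.foldl
        (fun sc t =>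
          (inverted.getD t.1 []).foldl
            (fun sc e => sc.modify e.1.toNat (· + e.2 * t.2)) sc)
        (List.replicate n (0 : Int))
      -- e.1 is an enumerate index, hence ≥ 0: .toNat is exact
      total.insert p.1
        (PySem.List.slice
          (PySem.List.sorted (PySem.List.enumerate scores) (fun pr => pr.2) true)
          none (some k)))
    PySem.Dict.empty).items

-- ===== PRECONDITION & SPEC =====
def Spec_to_all_query_to_all_document_score (queries_tf : List (String × List (String × Int))) (doc_tf : List (List (String × Int))) (k : Int) (out : List (String × List (Int × Int))) : Prop := out = to_all_query_to_all_document_score_alt queries_tf doc_tf k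
instance (queries_tf : List (String × List (String × Int))) (doc_tf : List (List (String × Int))) (k : Int) (out : List (String × List (Int × Int))) : Decidable (Spec_to_all_query_to_all_document_score queries_tf doc_tf k out) := by unfold Spec_to_all_query_to_all_document_score; infer_instance

-- ===== CLAIM (what is proved, stated in full; the proofs are below) =====
def Claim_equal_to_all_query_to_all_document_score : Prop := ∀ (queries_tf : List (String × List (String × Int))) (doc_tf : List (List (String × Int))) (k : Int), Dom_to_all_query_to_all_document_score queries_tf doc_tf k → Spec_to_all_query_to_all_document_score queries_tf doc_tf k (to_all_query_to_all_document_score queries_tf doc_tf k)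

-- ===== LEMMAS AND PROOFS =====
theorem pv_enum_eq {α : Type} (xs : List α) (a : α) (s : Int) :
    PySem.List.enumerate xs s
      = (List.range xs.length).map (fun (m : Nat) => ((s + (m : Int), xs.getD m a) : Int × α)) := by
  induction xs generalizing s with
  | nil => simp [PySem.List.enumerate]
  | cons x t ih =>
      rw [PySem.List.enumerate, ih (s + 1)]
      simp only [List.length_cons, List.range_succ_eq_map, List.map_cons, List.map_map]
      refine congrArg₂ _ (by simp) ?_
      refine List.map_congr_left (fun m _ => ?_)
      simp only [Function.comp_apply, List.getD_cons_succ, Nat.succ_eq_add_one, Prod.mk.injEq]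
      exact ⟨by push_cast; ring, trivial⟩

theorem pv_modfold_getElem? (u : List (Int × Int)) (g : Int × Int → Int) (sc : List Int) (j : Nat) :
    (u.foldl (fun sc e => sc.modify e.1.toNat (fun v => v + g e)) sc)[j]?
      = sc[j]?.map (· + ((u.filter (fun e => e.1.toNat == j)).map g).sum) := by
  induction u generalizing sc with
  | nil => simp
  | cons e u ih =>
      simp only [List.foldl_cons, ih, List.getElem?_modify, List.filter_cons]
      by_cases h : e.1.toNat = j
      · simp only [h, beq_self_eq_true, if_pos, List.map_cons, List.sum_cons]
        cases sc[j]? <;> simp [add_assoc]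
      · have hb : (e.1.toNat == j) = false := by simpa using h
        simp only [h, if_false, hb, Bool.false_eq_true]
        simp

theorem pv_scores_getElem? (ts : List (String × Int)) (P : String → List (Int × Int))
    (sc : List Int) (j : Nat) :
    (ts.foldl (fun sc t =>
        (P t.1).foldl (fun sc e => sc.modify e.1.toNat (fun v => v + e.2 * t.2)) sc) sc)[j]?
      = sc[j]?.map (· + (ts.map (fun t =>
          (((P t.1).filter (fun e => e.1.toNat == j)).map (fun e => e.2 * t.2)).sum)).sum) := by
  induction ts generalizing sc with
  | nil => simp
  | cons t ts ih =>
      simp only [List.foldl_cons, ih, pv_modfold_getElem? (P t.1) (fun e => e.2 * t.2) sc j,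
        Option.map_map, List.map_cons, List.sum_cons]
      cases sc[j]? <;> simp

theorem pv_inv_getD (l : List (Int × PySem.Dict String Int))
    (inv : PySem.Dict String (List (Int × Int))) (t : String) :
    (l.foldl (fun inv p =>
        p.2.items.foldl (fun inv q => inv.modify q.1 [] (· ++ [(p.1, q.2)])) inv) inv).getD t []
      = inv.getD t []
        ++ l.flatMap (fun p => (p.2.items.filter (fun q => q.1 == t)).map (fun q => (p.1, q.2))) := by
  induction l generalizing inv with
  | nil => simp
  | cons p l ih =>
      simp only [List.foldl_cons, ih, List.flatMap_cons]
      have h1 : (p.2.items.foldl (fun inv q => inv.modify q.1 [] (· ++ [(p.1, q.2)])) inv)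
          = ((p.2.items.map (fun q => (q.1, ((p.1, q.2) : Int × Int)))).foldl
              (fun d pr => d.modify pr.1 [] (· ++ [pr.2])) inv) := by
        rw [List.foldl_map]
      rw [h1, PySem.Dict.getD_foldl_modify_append, List.filter_map, List.map_map, List.append_assoc]
      refine congrArg _ (congrArg₂ _ ?_ rfl)
      simp [Function.comp_def]

theorem pv_items_filter_key (d : PySem.Dict String Int) (h : d.keys.Nodup) (t : String) :
    d.items.filter (fun q => q.1 == t)
      = if d.contains t then [(t, d.getD t 0)] else [] := by
  obtain ⟨l⟩ := d
  induction l with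
  | nil => simp [PySem.Dict.contains_mk]
  | cons x rest ih =>
      simp only [PySem.Dict.keys_mk, List.map_cons, List.nodup_cons] at h
      have hrest := ih (by simpa [PySem.Dict.keys_mk] using h.2)
      by_cases hx : x.1 = t
      · have hb : (x.1 == t) = true := by simpa using hx
        have hnc : rest.filter (fun q => q.1 == t) = [] := by
          rw [List.filter_eq_nil_iff]
          intro p hp hpt
          exact h.1 (hx ▸ (beq_iff_eq.mp hpt) ▸ List.mem_map_of_mem (f := Prod.fst) hp)
        have hcont : ({ items := x :: rest } : PySem.Dict String Int).contains t = true := by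
          simp [PySem.Dict.contains_mk, hb]
        have hget : ({ items := x :: rest } : PySem.Dict String Int).getD t 0 = x.2 := by
          rw [PySem.Dict.getD_eq_get?_getD, PySem.Dict.get?_mk_cons]
          simp [hb]
        show (x :: rest).filter (fun q => q.1 == t) = _
        rw [List.filter_cons, hcont, if_pos rfl, hget]
        simp [hnc, Prod.ext_iff, hx]
      · have hb : (x.1 == t) = false := by simpa using hx
        have hcont : ({ items := x :: rest } : PySem.Dict String Int).contains t
            = ({ items := rest } : PySem.Dict String Int).contains t := by
          simp [PySem.Dict.contains_mk, hb]
        have hget : ({ items := x :: rest } : PySem.Dict String Int).getD t 0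
            = ({ items := rest } : PySem.Dict String Int).getD t 0 := by
          rw [PySem.Dict.getD_eq_get?_getD, PySem.Dict.get?_mk_cons, PySem.Dict.getD_eq_get?_getD]
          simp [hb]
        show (x :: rest).filter (fun q => q.1 == t) = _
        rw [List.filter_cons, hcont, hget]
        simp only [hb, Bool.false_eq_true, if_false]
        exact hrest

theorem pv_scoreA_eq (q d : PySem.Dict String Int) :
    to_query_to_document_score q d
      = (q.items.map (fun tp =>
          if d.contains tp.1 then d.getD tp.1 0 * q.getD tp.1 0 else 0)).sum := by
  unfold to_query_to_document_score
  rw [PySem.List.foldl_congr_mem _ _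
      (fun s tp => s + (if d.contains tp.1 then d.getD tp.1 0 * q.getD tp.1 0 else 0)) 0
      (by intro acc x _; by_cases h : d.contains x.1 <;> simp [h])]
  rw [PySem.List.foldl_add]
  simp

theorem pv_sum_ite_range (n m : Nat) (hm : m < n) (g : Nat → Int) :
    ((List.range n).map (fun i => if i = m then g i else 0)).sum = g m := by
  induction n with
  | zero => omega
  | succ n ih =>
      rw [List.range_succ]
      by_cases h : m = n
      · subst h
        have hz : ((List.range m).map (fun i => if i = m then g i else 0)).sum = 0 := by
          rw [List.sum_eq_zero]
          intro x hx
          simp only [List.mem_map, List.mem_range] at hx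
          obtain ⟨i, hi, rfl⟩ := hx
          simp [Nat.ne_of_lt hi]
        simp [hz]
      · have hm' : m < n := by omega
        simp only [List.map_append, List.sum_append, ih hm', List.map_cons, List.map_nil,
          List.sum_cons, List.sum_nil]
        have : ¬ n = m := fun e => h e.symm
        simp [this]

-- proof-side name for B's inverted index
def pvInv (docs : List (PySem.Dict String Int)) : PySem.Dict String (List (Int × Int)) :=
  (PySem.List.enumerate docs).foldl
    (fun inv p => p.2.items.foldl (fun inv t => inv.modify t.1 [] (· ++ [(p.1, t.2)])) inv)
    PySem.Dict.empty

theorem pv_sum_flatMap (l : List Nat) (f : Nat → List Int) :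
    (l.flatMap f).sum = (l.map (fun a => (f a).sum)).sum := by
  rw [List.flatMap, List.sum_flatten, List.map_map]; rfl

theorem pv_postings_sum (docs : List (PySem.Dict String Int))
    (hdocs : ∀ d ∈ docs, d.keys.Nodup) (t : String) (c : Int) (j : Nat) (hj : j < docs.length) :
    ((((pvInv docs).getD t []).filter (fun e => e.1.toNat == j)).map (fun e => e.2 * c)).sum
      = if (docs.getD j PySem.Dict.empty).contains t
          then (docs.getD j PySem.Dict.empty).getD t 0 * c else 0 := by
  have h1 : (pvInv docs).getD t []
      = (List.range docs.length).flatMap (fun m =>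
          (((docs.getD m PySem.Dict.empty).items.filter (fun q => q.1 == t)).map
            (fun q => (((0 : Int) + (m : Int), q.2) : Int × Int)))) := by
    rw [pvInv, pv_inv_getD, PySem.Dict.getD_empty, pv_enum_eq docs PySem.Dict.empty 0,
      List.flatMap_map, List.nil_append]
  rw [h1, List.filter_flatMap, List.map_flatMap, pv_sum_flatMap]
  have h2 : ∀ m, (List.map (fun e => e.2 * c)
      (List.filter (fun e => e.1.toNat == j)
        (((docs.getD m PySem.Dict.empty).items.filter (fun q => q.1 == t)).map
          (fun q => (((0 : Int) + (m : Int), q.2) : Int × Int))))).sum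
      = if m = j then
          ((((docs.getD m PySem.Dict.empty).items.filter (fun q => q.1 == t)).map
            (fun q => q.2 * c)).sum) else 0 := by
    intro m
    rw [List.filter_map]
    by_cases hmj : m = j
    · subst hmj
      have : ∀ q ∈ (docs.getD m PySem.Dict.empty).items.filter (fun q => q.1 == t),
          (((fun e => e.1.toNat == m) ∘ (fun q => (((0 : Int) + (m : Int), q.2) : Int × Int))) q)
            = true := by intro q _; simp
      rw [List.filter_eq_self.mpr this, List.map_map, if_pos rfl]
      rfl
    · have : ((docs.getD m PySem.Dict.empty).items.filter (fun q => q.1 == t)).filter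
          ((fun e => e.1.toNat == j) ∘ (fun q => (((0 : Int) + (m : Int), q.2) : Int × Int))) = [] := by
        rw [List.filter_eq_nil_iff]
        intro q _
        simpa using hmj
      rw [this, if_neg hmj]
      rfl
  rw [List.map_congr_left (fun m _ => h2 m), pv_sum_ite_range _ _ hj]
  rw [pv_items_filter_key _ (hdocs _ (by rw [List.getD_eq_getElem _ _ hj]; exact List.getElem_mem hj)) t]
  by_cases hc : (docs.getD j PySem.Dict.empty).contains t = true
  · rw [if_pos hc, if_pos hc]; simp
  · rw [if_neg hc, if_neg hc]; simp

theorem pv_per_query (rq : List (String × Int)) (docs : List (PySem.Dict String Int))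
    (hdocs : ∀ d ∈ docs, d.keys.Nodup) :
    (to_query_to_all_document_score (PySem.Dict.ofList rq) docs).items
      = PySem.List.enumerate
          ((PySem.Dict.ofList rq).items.foldl
            (fun sc t => ((pvInv docs).getD t.1 []).foldl
              (fun sc e => sc.modify e.1.toNat (· + e.2 * t.2)) sc)
            (List.replicate docs.length (0 : Int))) := by
  have hq := PySem.Dict.nodup_keys_ofList rq
  set q := PySem.Dict.ofList rq with hqdef
  -- A's side: the score dict's items, as a map over range
  have hA : (to_query_to_all_document_score q docs).items
      = (List.range docs.length).map (fun (m : Nat) =>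
          (((m : Int), to_query_to_document_score q (docs.getD m PySem.Dict.empty)) : Int × Int)) := by
    unfold to_query_to_all_document_score
    rw [show ((docs.length : Int)) = ((docs.length : Nat) : Int) from rfl,
      PySem.List.pyRange_zero_natCast, List.foldl_map]
    rw [PySem.Dict.items_foldl_insert_fresh (List.range docs.length)
      (fun m => ((m : Nat) : Int))
      (fun m => to_query_to_document_score q (PySem.List.pyGetD docs ((m : Nat) : Int) PySem.Dict.empty))
      PySem.Dict.empty (by intro a _; exact PySem.Dict.contains_empty _)
      ((List.nodup_range).map (fun a b h => by exact_mod_cast h))]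
    show List.map _ _ = _
    exact List.map_congr_left (fun m _ => by rw [PySem.List.pyGetD_natCast])
  -- B's side: the accumulated score array, pointwise
  have hS : (q.items.foldl
        (fun sc t => ((pvInv docs).getD t.1 []).foldl
          (fun sc e => sc.modify e.1.toNat (· + e.2 * t.2)) sc)
        (List.replicate docs.length (0 : Int)))
      = (List.range docs.length).map (fun (m : Nat) =>
          to_query_to_document_score q (docs.getD m PySem.Dict.empty)) := by
    apply List.ext_getElem?
    intro j
    rw [pv_scores_getElem? q.items (fun t => (pvInv docs).getD t []) _ j]
    by_cases hj : j < docs.length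
    · rw [List.getElem?_replicate, if_pos hj, List.getElem?_map, List.getElem?_range hj]
      simp only [Option.map_some]
      congr 1
      rw [pv_scoreA_eq q (docs.getD j PySem.Dict.empty)]
      have hmap : q.items.map (fun t =>
            ((((pvInv docs).getD t.1 []).filter (fun e => e.1.toNat == j)).map
              (fun e => e.2 * t.2)).sum)
          = q.items.map (fun tp =>
            if (docs.getD j PySem.Dict.empty).contains tp.1
              then (docs.getD j PySem.Dict.empty).getD tp.1 0 * q.getD tp.1 0 else 0) :=
        List.map_congr_left (fun tp htp => by
          rw [pv_postings_sum docs hdocs tp.1 tp.2 j hj,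
            PySem.Dict.getD_of_mem_items q htp hq 0])
      rw [hmap]
      exact zero_add _
    · rw [List.getElem?_replicate, if_neg hj,
        List.getElem?_eq_none (by simpa using by omega)]
      rfl
  rw [hA, hS, pv_enum_eq _ (0 : Int) 0]
  simp only [List.length_map, List.length_range]
  exact List.map_congr_left (fun m hm => by
    rw [PySem.List.getD_map_range _ _ _ _ (List.mem_range.mp hm)]
    simp)

-- ===== VERDICT (by name: the statement is the Claim_ definition above) =====
theorem to_all_query_to_all_document_score_spec : Claim_equal_to_all_query_to_all_document_score := by
  intro queries_tf doc_tf k _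
  unfold Spec_to_all_query_to_all_document_score
  unfold to_all_query_to_all_document_score to_all_query_to_all_document_score_alt
  have hdocs : ∀ d ∈ doc_tf.map (fun d => PySem.Dict.ofList d), d.keys.Nodup := by
    intro d hd
    obtain ⟨raw, _, rfl⟩ := List.mem_map.mp hd
    exact PySem.Dict.nodup_keys_ofList raw
  refine congrArg PySem.Dict.items ?_
  refine PySem.List.foldl_congr_mem _ _ _ _ ?_
  intro acc p _
  refine congrArg (acc.insert p.1) ?_
  refine congrArg (fun xs => PySem.List.slice xs none (some k)) ?_
  rw [sort_dic_by_value_tolist]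
  refine congrArg (fun xs : List (Int × Int) => PySem.List.sorted xs (fun pr => pr.2) true) ?_
  exact pv_per_query p.2 (doc_tf.map (fun d => PySem.Dict.ofList d)) hdocs
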